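-- pv_equiv track=rewrite | github.com/nxp-mcuxpresso/mcuxsdk-manifests | scripts/west_commands/utilities/device_board_mapper.py | _group_boards_by_family
-- ===== SOURCE A (Python) =====
-- from typing import List, Dict, Optional, Callable
--
-- def _group_boards_by_family(boards: List[str]) -> Dict[str, List[str]]:
--     """Group boards by family for better organization."""
--     groups = {}
--
--     # Common board family patterns
--     family_patterns = {
--         'frdmmcx': 'FRDM-MCX',
--         'mcx': 'MCX EVK',
--         'frdmk': 'FRDM-Kinetis',
--         'frdmlpc': 'FRDM-LPC',
--         'lpc': 'LPC',
--         'evk': 'EVK',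
--         'mimxrt': 'i.MX RT',
--     }
--
--     for board in boards:
--         board_lower = board.lower()
--         family_found = False
--
--         for pattern, family_name in family_patterns.items():
--             if board_lower.startswith(pattern):
--                 if family_name not in groups:
--                     groups[family_name] = []
--                 groups[family_name].append(board)
--                 family_found = True
--                 break
--
--         if not family_found:
--             if 'Other' not in groups:
--                 groups['Other'] = []
--             groups['Other'].append(board)
--
--     # Sort boards within each group
--     for family in groups:
--         groups[family].sort()
--
--     return groups
-- ===== SOURCE B (Python) =====
-- from typing import List, Dict
--
-- _FAMILY_PATTERNS = [
--     ('frdmmcx', 'FRDM-MCX'),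
--     ('mcx', 'MCX EVK'),
--     ('frdmk', 'FRDM-Kinetis'),
--     ('frdmlpc', 'FRDM-LPC'),
--     ('lpc', 'LPC'),
--     ('evk', 'EVK'),
--     ('mimxrt', 'i.MX RT'),
-- ]
--
--
-- def _family_of(board: str) -> str:
--     bl = board.lower()
--     return next((name for pat, name in _FAMILY_PATTERNS if bl.startswith(pat)), 'Other')
--
--
-- def _group_boards_by_family(boards: List[str]) -> Dict[str, List[str]]:
--     """Group boards by family: label once, then a pure dict comprehension."""
--     fams = [_family_of(b) for b in boards]
--     return {f: sorted(b for b, g in zip(boards, fams) if g == f)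
--             for f in dict.fromkeys(fams)}
-- ===== Notes on version B (the rewrite author's own statement) =====
-- stated objective: simpler
-- what changed: Replaces A's single mutating pass (dict of growing buckets plus a trailing per-group sort loop) by a functional staged computation: label every board once, take key order from dict.fromkeys, and build each group as one sorted filtered comprehension.
import Mathlib
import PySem

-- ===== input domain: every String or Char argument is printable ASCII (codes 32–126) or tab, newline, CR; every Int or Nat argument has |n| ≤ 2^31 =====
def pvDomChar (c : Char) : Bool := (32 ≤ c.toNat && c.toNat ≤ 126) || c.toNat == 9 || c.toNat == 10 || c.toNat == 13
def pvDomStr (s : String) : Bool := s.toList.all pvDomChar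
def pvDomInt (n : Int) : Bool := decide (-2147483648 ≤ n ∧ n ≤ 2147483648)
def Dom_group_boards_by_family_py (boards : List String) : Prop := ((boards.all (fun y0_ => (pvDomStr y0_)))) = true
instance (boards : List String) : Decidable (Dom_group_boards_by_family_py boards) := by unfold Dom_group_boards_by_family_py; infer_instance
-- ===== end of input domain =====

-- B replaces A's mutating pass + trailing per-group sorts by a pure staged computation:
-- label once, key order from dict.fromkeys, each group one sorted filtered comprehension (objective: simpler).

-- ===== PORT A =====
-- the family_patterns dict literal, in insertion order
def pvFamilyPatterns : List (String × String) :=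
  [("frdmmcx", "FRDM-MCX"), ("mcx", "MCX EVK"), ("frdmk", "FRDM-Kinetis"),
   ("frdmlpc", "FRDM-LPC"), ("lpc", "LPC"), ("evk", "EVK"), ("mimxrt", "i.MX RT")]

-- A's inner 'for pattern, family_name … if startswith: … break' loop: first matching family name, none = no match
def pvFindFamily (bl : String) : List (String × String) → Option String
  | [] => none
  | (p, name) :: rest => if PySem.Str.startswith bl p then some name else pvFindFamily bl rest

def group_boards_by_family_py (boards : List String) : List (String × List String) :=
  let groups : PySem.Dict String (List String) :=
    boards.foldl (fun d board =>
      let bl := PySem.Str.lower board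
      match pvFindFamily bl pvFamilyPatterns with
      | some name =>
          let g := if d.contains name then d else d.insert name []
          g.insert name (g.getD name [] ++ [board])
      | none =>
          let g := if d.contains "Other" then d else d.insert "Other" []
          g.insert "Other" (g.getD "Other" [] ++ [board])) PySem.Dict.empty
  -- for family in groups: groups[family].sort()
  let sortedGroups :=
    groups.keys.foldl (fun d k => d.insert k (PySem.List.sorted (d.getD k []) (fun x => x) false)) groups
  sortedGroups.items

-- ===== PORT B =====
-- Source B's _family_of helper (next(... , 'Other') over the pattern table)
def pvFamilyOf (board : String) : String :=
  (pvFindFamily (PySem.Str.lower board) pvFamilyPatterns).getD "Other"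

def group_boards_by_family_py_alt (boards : List String) : List (String × List String) :=
  -- fams = [_family_of(b) for b in boards]
  let fams := boards.map pvFamilyOf
  -- {f: sorted(b for b, g in zip(boards, fams) if g == f) for f in dict.fromkeys(fams)}
  (PySem.Set.ofList fams).map
    (fun f => (f, PySem.List.sorted (((boards.zip fams).filter (fun p => p.2 == f)).map Prod.fst)
                    (fun x => x) false))

-- ===== PRECONDITION & SPEC =====
def Spec_group_boards_by_family_py (boards : List String) (out : List (String × List String)) : Prop := out = group_boards_by_family_py_alt boards
instance (boards : List String) (out : List (String × List String)) : Decidable (Spec_group_boards_by_family_py boards out) := by unfold Spec_group_boards_by_family_py; infer_instance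

-- ===== CLAIM (what is proved, stated in full; the proofs are below) =====
def Claim_equal_group_boards_by_family_py : Prop := ∀ (boards : List String), Dom_group_boards_by_family_py boards → Spec_group_boards_by_family_py boards (group_boards_by_family_py boards)

-- ===== LEMMAS AND PROOFS =====

-- abbreviation used only in the proofs: Python's default sorted
def pvS (xs : List String) : List String := PySem.List.sorted xs (fun x => x) false

-- A's body for one board collapses to a single insert at the board's family key
theorem pv_ins_step (d : PySem.Dict String (List String)) (k : String) (b : String) :
    (let g := if d.contains k then d else d.insert k []
     g.insert k (g.getD k [] ++ [b])) = d.insert k (d.getD k [] ++ [b]) := by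
  by_cases hc : d.contains k
  · simp [hc]
  · simp only [Bool.not_eq_true] at hc
    simp only [hc, if_false, Bool.false_eq_true, PySem.Dict.getD_insert_self,
      PySem.Dict.insert_insert_self, PySem.Dict.getD_of_not_contains d ([] : List String) hc]

theorem pv_stepA_eq (d : PySem.Dict String (List String)) (b : String) :
    (let bl := PySem.Str.lower b
     match pvFindFamily bl pvFamilyPatterns with
     | some name =>
         let g := if d.contains name then d else d.insert name []
         g.insert name (g.getD name [] ++ [b])
     | none =>
         let g := if d.contains "Other" then d else d.insert "Other" []
         g.insert "Other" (g.getD "Other" [] ++ [b]))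
    = d.insert (pvFamilyOf b) (d.getD (pvFamilyOf b) [] ++ [b]) := by
  unfold pvFamilyOf
  cases h : pvFindFamily (PySem.Str.lower b) pvFamilyPatterns with
  | none => simpa [h] using pv_ins_step d "Other" b
  | some name => simpa [h] using pv_ins_step d name b

-- the append fold: value at k is the old value followed by the key-k boards, in order
theorem pv_getD_foldl_ins (l : List String) (d : PySem.Dict String (List String)) (k : String) :
    (l.foldl (fun d b => d.insert (pvFamilyOf b) (d.getD (pvFamilyOf b) [] ++ [b])) d).getD k []
      = d.getD k [] ++ l.filter (fun b => pvFamilyOf b == k) := by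
  induction l generalizing d with
  | nil => simp
  | cons a t ih =>
    simp only [List.foldl_cons, List.filter_cons, ih, PySem.Dict.getD_insert]
    by_cases hk : k = pvFamilyOf a
    · subst hk
      simp
    · have hba : (pvFamilyOf a == k) = false := by
        simpa using fun h => hk h.symm
      simp [hk, hba]

-- a Set.update by already-present elements is the identity
theorem pv_update_self (s xs : List String) (h : ∀ x ∈ xs, x ∈ s) :
    PySem.Set.update s xs = s := by
  rw [PySem.Set.update_eq_append_filter]
  have hf : List.filter (fun y => !PySem.Set.contains s y) (PySem.Set.ofList xs) = [] := by
    apply List.filter_eq_nil_iff.mpr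
    intro y hy
    have hys : y ∈ s := h y ((PySem.Set.mem_ofList _ _).1 hy)
    simpa [PySem.Set.contains_iff] using hys
  rw [hf, List.append_nil]

-- A's trailing per-key sort pass, over a Nodup key list
theorem pv_getD_foldl_sort (ks : List String) (d : PySem.Dict String (List String)) (k : String)
    (h : ks.Nodup) :
    (ks.foldl (fun d k => d.insert k (pvS (d.getD k []))) d).getD k []
      = if k ∈ ks then pvS (d.getD k []) else d.getD k [] := by
  induction ks generalizing d with
  | nil => simp
  | cons a t ih =>
    obtain ⟨hat, ht⟩ := List.nodup_cons.mp h
    simp only [List.foldl_cons, ih _ ht, List.mem_cons]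
    by_cases hk : k = a
    · subst hk
      simp [hat, PySem.Dict.getD_insert_self]
    · rw [PySem.Dict.getD_insert]
      simp [hk]

-- characterization of A's result
theorem pv_A_char (boards : List String) :
    group_boards_by_family_py boards
      = (PySem.Set.ofList (boards.map pvFamilyOf)).map
          (fun k => (k, pvS (boards.filter (fun b => pvFamilyOf b == k)))) := by
  unfold group_boards_by_family_py
  have hstep : (fun (d : PySem.Dict String (List String)) board =>
      let bl := PySem.Str.lower board
      match pvFindFamily bl pvFamilyPatterns with
      | some name =>
          let g := if d.contains name then d else d.insert name []
          g.insert name (g.getD name [] ++ [board])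
      | none =>
          let g := if d.contains "Other" then d else d.insert "Other" []
          g.insert "Other" (g.getD "Other" [] ++ [board]))
      = fun d b => d.insert (pvFamilyOf b) (d.getD (pvFamilyOf b) [] ++ [b]) := by
    funext d b; exact pv_stepA_eq d b
  rw [hstep]
  set dA := boards.foldl (fun d b => d.insert (pvFamilyOf b) (d.getD (pvFamilyOf b) [] ++ [b]))
    PySem.Dict.empty with hdA
  have hkeys : dA.keys = PySem.Set.ofList (boards.map pvFamilyOf) := by
    rw [hdA, PySem.Dict.keys_foldl_insert_key]
    simp [PySem.Set.update_nil_left]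
  have hnd : dA.keys.Nodup := by rw [hkeys]; exact PySem.Set.nodup_ofList _
  have hval : ∀ k, dA.getD k [] = boards.filter (fun b => pvFamilyOf b == k) := by
    intro k; rw [hdA, pv_getD_foldl_ins]; simp
  set dS := dA.keys.foldl (fun d k => d.insert k (PySem.List.sorted (d.getD k []) (fun x => x) false)) dA
    with hdS
  have hfold : dS = dA.keys.foldl (fun d k => d.insert k (pvS (d.getD k []))) dA := by
    rw [hdS]; rfl
  have hkeysS : dS.keys = dA.keys := by
    rw [hfold, PySem.Dict.keys_foldl_insert]
    exact pv_update_self _ _ (fun x hx => hx)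
  have hndS : dS.keys.Nodup := by rw [hkeysS]; exact hnd
  rw [PySem.Dict.items_eq_map_keys dS hndS [], hkeysS, hkeys]
  apply List.map_congr_left
  intro k hk
  have hkmem : k ∈ dA.keys := by rw [hkeys]; exact hk
  rw [hfold, pv_getD_foldl_sort dA.keys dA k hnd]
  simp [hkmem, hval k]

-- the zip-filter-map comprehension is a plain filter of boards
theorem pv_zip_filter (l : List String) (k : String) :
    ((l.zip (l.map pvFamilyOf)).filter (fun p => p.2 == k)).map Prod.fst
      = l.filter (fun b => pvFamilyOf b == k) := by
  induction l with
  | nil => rfl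
  | cons a t ih =>
    simp only [List.map_cons, List.zip_cons_cons, List.filter_cons]
    by_cases hk : pvFamilyOf a == k
    · simp [hk, ih]
    · simp only [Bool.not_eq_true] at hk
      simp [hk, ih]

-- ===== VERDICT (by name: the statement is the Claim_ definition above) =====
theorem group_boards_by_family_py_spec : Claim_equal_group_boards_by_family_py := by
  intro boards _
  unfold Spec_group_boards_by_family_py
  rw [pv_A_char]
  unfold group_boards_by_family_py_alt
  apply List.map_congr_left
  intro k _
  simp only [pv_zip_filter]
  rfl
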